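-- pv_equiv track=rewrite | github.com/dMedinaO/hydrophobinsIdentification | scripts/searchClassI.py | getPosicionesCys
-- ===== SOURCE A (Python) =====
-- def getPosicionesCys(sequence):
--
--     posiciones = []
--
--     for i in range(len(sequence)):
--
--         try:
--             if sequence[i] == 'C' and sequence[i+1] != 'C':
--                 posiciones.append(i)
--         except:
--             pass
--     return posiciones
-- ===== SOURCE B (Python) =====
-- def getPosicionesCys(sequence):
--     # Run-compression scan: skip each maximal run of consecutive 'C's in one
--     # step; only the last 'C' of a run qualifies, and only if a character
--     # (necessarily a non-'C') follows the run.
--     positions = []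
--     n = len(sequence)
--     i = 0
--     while i < n:
--         if sequence[i] == 'C':
--             j = i + 1
--             while j < n and sequence[j] == 'C':
--                 j += 1
--             if j < n:
--                 positions.append(j - 1)
--             i = j
--         else:
--             i += 1
--     return positions
-- ===== Notes on version B (the rewrite author's own statement) =====
-- stated objective: alternative
-- what changed: Replaces A's per-index scan with try/except around sequence[i+1] by a run-compression scan: an outer loop jumps over each maximal run of consecutive 'C's found by an inner loop, emitting at most one index per run (its last 'C', only when a character follows the run), so no index ever looks past the end.
import Mathlib
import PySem

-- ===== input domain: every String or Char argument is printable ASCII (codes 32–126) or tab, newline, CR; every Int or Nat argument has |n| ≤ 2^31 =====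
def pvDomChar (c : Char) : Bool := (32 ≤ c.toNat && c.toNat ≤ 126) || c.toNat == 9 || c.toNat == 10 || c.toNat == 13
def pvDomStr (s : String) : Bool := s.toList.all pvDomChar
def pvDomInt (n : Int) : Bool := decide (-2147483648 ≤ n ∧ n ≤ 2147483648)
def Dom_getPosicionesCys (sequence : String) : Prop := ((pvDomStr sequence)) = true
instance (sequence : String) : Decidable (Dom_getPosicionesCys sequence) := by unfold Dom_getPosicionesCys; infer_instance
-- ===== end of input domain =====

-- B replaces A's per-index scan (try/except around sequence[i+1]) by a run-compression
-- scan: each maximal run of 'C's is skipped in one step and emits at most one index.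

-- ===== PORT A =====
-- for i in range(len(sequence)): try: if sequence[i]=='C' and sequence[i+1]!='C': append(i); except: pass
-- The try/except is ported by matching on pyGet?: 'none' (IndexError) falls through to 'pass'.
def getPosicionesCys (sequence : String) : List Int :=
  (PySem.List.pyRange 0 (sequence.toList.length : Int) 1).foldl
    (fun acc i =>
      match PySem.List.pyGet? sequence.toList i, PySem.List.pyGet? sequence.toList (i + 1) with
      | some a, some b => if a = 'C' ∧ b ≠ 'C' then acc ++ [i] else acc
      | _, _ => acc)
    []

-- ===== PORT B =====
-- run length starting at the scan point (the inner "while j < n and sequence[j] == 'C'");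
-- the remaining part of the string from index i is represented as the suffix list
def cntC : List Char → Nat
  | [] => 0
  | c :: tl => if c = 'C' then cntC tl + 1 else 0

-- the outer while loop over the suffix at index pos: either step past one non-'C'
-- char, or jump over the whole leading run of 'C's (i = j), appending j-1 if j < n
def goB : List Char → Int → List Int
  | [], _ => []
  | c :: tl, pos =>
    if c = 'C' then
      let k := cntC (c :: tl)
      let rest := (c :: tl).drop k
      (if rest ≠ [] then [pos + (k : Int) - 1] else []) ++ goB rest (pos + (k : Int))
    else goB tl (pos + 1)
  termination_by cs _ => cs.length
  decreasing_by
    · have h1 : 0 < cntC (c :: tl) := by simp [cntC, *]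
      simp only [List.length_drop, List.length_cons]
      omega
    · simp

def getPosicionesCys_alt (sequence : String) : List Int :=
  goB sequence.toList 0

-- ===== PRECONDITION & SPEC =====
def Spec_getPosicionesCys (sequence : String) (out : List Int) : Prop := out = getPosicionesCys_alt sequence
instance (sequence : String) (out : List Int) : Decidable (Spec_getPosicionesCys sequence out) := by unfold Spec_getPosicionesCys; infer_instance

-- ===== CLAIM (what is proved, stated in full; the proofs are below) =====
def Claim_equal_getPosicionesCys : Prop := ∀ (sequence : String), Dom_getPosicionesCys sequence → Spec_getPosicionesCys sequence (getPosicionesCys sequence)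

-- ===== LEMMAS AND PROOFS =====

-- reference function: positions (starting at s) of 'C' followed by a non-'C'
def cysGo : List Char → Int → List Int
  | [], _ => []
  | [_], _ => []
  | c1 :: c2 :: rest, s =>
      (if c1 = 'C' ∧ c2 ≠ 'C' then [s] else []) ++ cysGo (c2 :: rest) (s + 1)

theorem cntC_le (cs : List Char) : cntC cs ≤ cs.length := by
  induction cs with
  | nil => simp [cntC]
  | cons c tl ih => simp only [cntC, List.length_cons]; split_ifs <;> omega

-- cysGo over a maximal leading run of 'C's collapses to one (optional) index
theorem cysGo_run (cs : List Char) : ∀ (pos : Int), cs.head? = some 'C' →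
    cysGo cs pos =
      (if cs.drop (cntC cs) ≠ [] then [pos + (cntC cs : Int) - 1] else []) ++
        cysGo (cs.drop (cntC cs)) (pos + (cntC cs : Int)) := by
  induction cs with
  | nil => intro pos h; simp at h
  | cons c1 tl ih =>
    intro pos h
    have hc1 : c1 = 'C' := by simpa using h
    subst hc1
    cases tl with
    | nil => simp [cysGo, cntC]
    | cons c2 rest =>
      by_cases hc2 : c2 = 'C'
      · subst hc2
        have ht := ih (pos + 1) (by simp)
        have hcnt : cntC ('C' :: 'C' :: rest) = cntC ('C' :: rest) + 1 := by
          simp [cntC]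
        rw [cysGo]
        simp only [hcnt]
        rw [show ('C' :: 'C' :: rest).drop (cntC ('C' :: rest) + 1)
              = ('C' :: rest).drop (cntC ('C' :: rest)) from rfl]
        rw [show (if (True ∧ ('C' : Char) ≠ 'C') then [pos] else ([] : List Int)) = [] by simp]
        rw [ht]
        have : pos + 1 + (cntC ('C' :: rest) : Int) = pos + ((cntC ('C' :: rest) : Int) + 1) := by ring
        simp only [List.nil_append, this]
        congr 2
      · have hcnt : cntC ('C' :: c2 :: rest) = 1 := by simp [cntC, hc2]
        rw [cysGo, hcnt]
        simp [hc2]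

theorem goB_eq_cysGo (cs : List Char) : ∀ (pos : Int), goB cs pos = cysGo cs pos := by
  induction hlen : cs.length using Nat.strong_induction_on generalizing cs with
  | _ n ih =>
    intro pos
    cases cs with
    | nil => simp [goB, cysGo]
    | cons c tl =>
      by_cases hc : c = 'C'
      · subst hc
        rw [goB]
        simp only [if_true]
        have hk : 0 < cntC ('C' :: tl) := by simp [cntC]
        have hle := cntC_le ('C' :: tl)
        rw [cysGo_run ('C' :: tl) pos (by simp)]
        congr 1
        exact ih (('C' :: tl).drop (cntC ('C' :: tl))).length
          (by subst hlen; simp only [List.length_drop]; simp only [List.length_cons] at hle ⊢; omega)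
          _ rfl _
      · rw [goB]
        simp only [if_neg hc]
        have htl := ih tl.length (by subst hlen; simp) tl rfl (pos + 1)
        rw [htl]
        cases tl with
        | nil => simp [cysGo]
        | cons c2 rest =>
          rw [cysGo]
          simp [hc]

theorem cysGo_loopA (full : List Char) : ∀ (k : Nat) (acc : List Int),
    (PySem.List.pyRange (k : Int) (full.length : Int) 1).foldl
      (fun acc i =>
        match PySem.List.pyGet? full i, PySem.List.pyGet? full (i + 1) with
        | some a, some b => if a = 'C' ∧ b ≠ 'C' then acc ++ [i] else acc
        | _, _ => acc)
      acc = acc ++ cysGo (full.drop k) (k : Int) := by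
  intro k
  induction hlen : full.length - k generalizing k with
  | zero =>
    intro acc
    have hk : (full.length : Int) ≤ (k : Int) := by exact_mod_cast Nat.le_of_sub_eq_zero hlen
    rw [PySem.List.pyRange_one_eq_nil hk]
    rw [List.drop_of_length_le (by omega)]
    simp [cysGo]
  | succ m ih =>
    intro acc
    have hk : k < full.length := by omega
    have hki : (k : Int) < (full.length : Int) := by exact_mod_cast hk
    rw [PySem.List.pyRange_one_cons hki]
    have hdrop : full.drop k = full[k] :: full.drop (k + 1) := (List.getElem_cons_drop hk).symm
    have hget : PySem.List.pyGet? full (k : Int) = some full[k] := by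
      rw [PySem.List.pyGet?_natCast]; simp [hk]
    have hcastk : ((k : Int) + 1) = ((k + 1 : Nat) : Int) := by push_cast; ring
    simp only [List.foldl_cons, hget]
    have hrec := ih (k + 1) (by omega)
    by_cases hk1 : k + 1 < full.length
    · have hget1 : PySem.List.pyGet? full ((k : Int) + 1) = some full[k + 1] := by
        rw [hcastk, PySem.List.pyGet?_natCast]; simp [hk1]
      have hdrop1 : full.drop (k + 1) = full[k + 1] :: full.drop (k + 2) :=
        (List.getElem_cons_drop hk1).symm
      rw [hget1, hcastk, hrec, hdrop, hdrop1, cysGo]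
      by_cases hcc : full[k] = 'C' ∧ full[k + 1] ≠ 'C' <;>
        simp [hcc, ← hdrop1, ← hcastk]
    · have hget1 : PySem.List.pyGet? full ((k : Int) + 1) = none := by
        rw [hcastk, PySem.List.pyGet?_natCast]
        simp [List.getElem?_eq_none (by omega : full.length ≤ k + 1)]
      have hdrop1 : full.drop (k + 1) = [] := List.drop_of_length_le (by omega)
      rw [hget1, hcastk, hrec, hdrop, hdrop1, cysGo]
      simp [cysGo]

-- ===== VERDICT (by name: the statement is the Claim_ definition above) =====
theorem getPosicionesCys_spec : Claim_equal_getPosicionesCys := by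
  intro s _
  unfold Spec_getPosicionesCys getPosicionesCys getPosicionesCys_alt
  rw [goB_eq_cysGo]
  have h := cysGo_loopA s.toList 0 []
  simpa using h
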